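-- pv_equiv track=rewrite | github.com/imdangi/HackerRank_Python_Practice | test.py | polCheck
-- ===== SOURCE A (Python) =====
-- def polCheck(x,k):
--     sum=0
--     for i in range(k-1,-1,-1):
--         sum+=x**i
--     if(sum==k):
--         return True
--     else:
--         return False
-- ===== SOURCE B (Python) =====
-- def polCheck(x, k):
--     # closed-form geometric sum: sum_{i=0}^{k-1} x**i == k
--     if k <= 0:
--         return k == 0
--     if x == 1:
--         return True
--     return pow(x, k) - 1 == k * (x - 1)
-- ===== Notes on version B (the rewrite author's own statement) =====
-- stated objective: faster
-- what changed: Replaces the O(k) loop summing x**i with the closed-form geometric-sum identity (x^k-1 == k*(x-1) for x != 1, always True for x == 1, k == 0 for empty range), using builtin pow (fast exponentiation).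
import Mathlib
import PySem

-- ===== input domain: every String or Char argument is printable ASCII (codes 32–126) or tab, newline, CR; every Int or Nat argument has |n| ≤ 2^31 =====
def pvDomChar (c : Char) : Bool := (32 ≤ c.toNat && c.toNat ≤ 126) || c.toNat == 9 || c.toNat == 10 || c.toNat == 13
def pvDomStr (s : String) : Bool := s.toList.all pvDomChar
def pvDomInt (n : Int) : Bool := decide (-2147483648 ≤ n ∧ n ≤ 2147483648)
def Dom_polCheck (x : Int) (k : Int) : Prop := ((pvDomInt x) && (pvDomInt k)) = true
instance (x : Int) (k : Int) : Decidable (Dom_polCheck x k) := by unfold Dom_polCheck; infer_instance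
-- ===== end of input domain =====

-- B replaces A's O(k) summation loop by the closed-form geometric-sum identity with fast exponentiation (asymptotically faster).


-- ===== PORT A =====
-- literal port: sum = 0; for i in range(k-1, -1, -1): sum += x**i; return sum == k
-- (every i produced by the range is ≥ 0, so x ** i is x ^ i.toNat exactly)
def polCheck (x : Int) (k : Int) : Bool :=
  let sum := (PySem.List.pyRange (k - 1) (-1) (-1)).foldl (fun s i => s + x ^ i.toNat) 0
  if sum == k then true else false

-- ===== PORT B =====
def polCheck_alt (x : Int) (k : Int) : Bool :=
  if k ≤ 0 then k == 0
  else if x == 1 then true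
  else x ^ k.toNat - 1 == k * (x - 1)

-- ===== PRECONDITION & SPEC =====
def Spec_polCheck (x : Int) (k : Int) (out : Bool) : Prop := out = polCheck_alt x k
instance (x : Int) (k : Int) (out : Bool) : Decidable (Spec_polCheck x k out) := by unfold Spec_polCheck; infer_instance

-- ===== CLAIM (what is proved, stated in full; the proofs are below) =====
def Claim_equal_polCheck : Prop := ∀ (x : Int) (k : Int), Dom_polCheck x k → Spec_polCheck x k (polCheck x k)

-- ===== LEMMAS AND PROOFS =====

-- A's countdown loop computes c + (geometric sum up to n terms)
theorem polCheck_foldl_sum (x : Int) (n : Nat) (c : Int) :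
    (PySem.List.pyRange ((n : Int) - 1) (-1) (-1)).foldl (fun s i => s + x ^ i.toNat) c
      = c + ∑ i ∈ Finset.range n, x ^ i := by
  induction n generalizing c with
  | zero => simp [PySem.List.pyRange_neg_one_eq_nil]
  | succ m ih =>
    rw [PySem.List.pyRange_neg_one_cons (by omega : (-1 : Int) < (m + 1 : Nat) - 1)]
    have h1 : ((m + 1 : Nat) : Int) - 1 - 1 = (m : Int) - 1 := by push_cast; ring
    have h2 : (((m + 1 : Nat) : Int) - 1).toNat = m := by omega
    rw [List.foldl_cons, h1, ih, h2, Finset.sum_range_succ]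
    ring

theorem polCheck_eq_decide (x k : Int) :
    polCheck x k = decide ((∑ i ∈ Finset.range k.toNat, x ^ i) = k) := by
  have hsum : (PySem.List.pyRange (k - 1) (-1) (-1)).foldl (fun s i => s + x ^ i.toNat) 0
      = ∑ i ∈ Finset.range k.toNat, x ^ i := by
    by_cases hk : k ≤ 0
    · rw [PySem.List.pyRange_neg_one_eq_nil (by omega)]
      have h0 : k.toNat = 0 := by omega
      simp [h0]
    · rw [show k - 1 = ((k.toNat : Nat) : Int) - 1 by omega, polCheck_foldl_sum]
      simp
  show (if (PySem.List.pyRange (k - 1) (-1) (-1)).foldl (fun s i => s + x ^ i.toNat) 0 == k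
      then true else false) = _
  rw [hsum]
  by_cases h : (∑ i ∈ Finset.range k.toNat, x ^ i) = k <;> simp [h]

theorem polCheck_spec' (x k : Int) : polCheck x k = polCheck_alt x k := by
  rw [polCheck_eq_decide]
  unfold polCheck_alt
  by_cases hk : k ≤ 0
  · have h0 : k.toNat = 0 := by omega
    rw [if_pos hk]
    by_cases hz : k = 0
    · subst hz; simp
    · have hz' : (0 : Int) ≠ k := fun h => hz h.symm
      simp [h0, hz', hz]
  · rw [if_neg hk]
    by_cases hx : x = 1
    · subst hx
      have hc : ((k.toNat : Int)) = k := by omega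
      simp [hc]
    · have hne : x - 1 ≠ 0 := by intro h; apply hx; omega
      have key : (∑ i ∈ Finset.range k.toNat, x ^ i = k) ↔ (x ^ k.toNat - 1 = k * (x - 1)) := by
        constructor
        · intro h; rw [← geom_sum_mul, h]
        · intro h
          have hm := geom_sum_mul x k.toNat
          rw [h] at hm
          exact mul_right_cancel₀ hne hm
      simp only [hx, beq_iff_eq, if_false]
      by_cases h : x ^ k.toNat - 1 = k * (x - 1) <;> simp [h, key]

-- ===== VERDICT (by name: the statement is the Claim_ definition above) =====
theorem polCheck_spec : Claim_equal_polCheck := by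
  intro x k _
  unfold Spec_polCheck
  exact polCheck_spec' x k
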